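-- pv_equiv track=rewrite | github.com/spicymuffin/labs-1 | lab8/lab8_2023148006/lab8_p2.py | removeValuesInPlace
-- ===== SOURCE A (Python) =====
-- def removeValuesInPlace(L, threshold):
--     """removes values above thresehold in L
--
--     Args:
--         L (list): list to be mutated
--         threshold (int): threshold
--
--     Returns:
--         list: mutated list
--     """
--     i = 0
--     while i < len(L):  # iterate
--         if L[i] > threshold:  # if condition
--             del L[i]  # remove
--             i -= 1  # dont skip!!
--         i += 1  # increment
--     return L
-- ===== SOURCE B (Python) =====
-- def removeValuesInPlace(L, threshold):
--     L[:] = [x for x in L if x <= threshold]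
--     return L
-- ===== Notes on version B (the rewrite author's own statement) =====
-- stated objective: faster
-- what changed: Replaces the delete-and-rewind while loop (each del shifts the tail) with a single filter comprehension assigned back via L[:], mutating the same list object in one pass.
import Mathlib
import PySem

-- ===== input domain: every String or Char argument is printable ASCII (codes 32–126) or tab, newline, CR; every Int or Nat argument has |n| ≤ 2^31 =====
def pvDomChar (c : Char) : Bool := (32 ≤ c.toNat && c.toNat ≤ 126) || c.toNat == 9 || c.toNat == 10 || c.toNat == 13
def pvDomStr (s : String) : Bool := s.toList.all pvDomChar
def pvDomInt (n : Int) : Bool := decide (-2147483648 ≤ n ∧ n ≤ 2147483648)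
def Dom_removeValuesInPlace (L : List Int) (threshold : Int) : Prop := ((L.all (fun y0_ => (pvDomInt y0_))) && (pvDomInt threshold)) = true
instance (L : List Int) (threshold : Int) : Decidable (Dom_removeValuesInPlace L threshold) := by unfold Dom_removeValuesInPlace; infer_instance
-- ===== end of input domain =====

-- B replaces A's delete-and-rewind while loop with one filter comprehension
-- assigned back via L[:]; return-value equivalence (both Pythons mutate the
-- argument list in place to the same final contents).

-- ===== PORT A =====
-- A's while loop: i scans; `del L[i]` removes, with the i -= 1 / i += 1 dance.
def removeValuesInPlaceLoopA (threshold : Int) (L : List Int) (i : Nat) : List Int :=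
  if h : i < L.length then
    if L[i] > threshold then
      removeValuesInPlaceLoopA threshold (L.eraseIdx i) i
    else
      removeValuesInPlaceLoopA threshold L (i + 1)
  else L
termination_by L.length - i
decreasing_by
  · simp [List.length_eraseIdx, h]; omega
  · omega

def removeValuesInPlace (L : List Int) (threshold : Int) : List Int :=
  removeValuesInPlaceLoopA threshold L 0

-- ===== PORT B =====
-- B's comprehension [x for x in L if x <= threshold]: structural recursion on L.
def removeValuesInPlaceComp (threshold : Int) : List Int → List Int
  | [] => []
  | x :: xs =>
      if x ≤ threshold then x :: removeValuesInPlaceComp threshold xs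
      else removeValuesInPlaceComp threshold xs

-- the L[:] = … assignment leaves exactly the comprehension's contents in L
def removeValuesInPlace_alt (L : List Int) (threshold : Int) : List Int :=
  removeValuesInPlaceComp threshold L

-- ===== PRECONDITION & SPEC =====
def Spec_removeValuesInPlace (L : List Int) (threshold : Int) (out : List Int) : Prop := out = removeValuesInPlace_alt L threshold
instance (L : List Int) (threshold : Int) (out : List Int) : Decidable (Spec_removeValuesInPlace L threshold out) := by unfold Spec_removeValuesInPlace; infer_instance

-- ===== CLAIM (what is proved, stated in full; the proofs are below) =====
def Claim_equal_removeValuesInPlace : Prop := ∀ (L : List Int) (threshold : Int), Dom_removeValuesInPlace L threshold → Spec_removeValuesInPlace L threshold (removeValuesInPlace L threshold)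

-- ===== LEMMAS AND PROOFS =====

-- A's loop keeps the already-scanned prefix and filters the rest.
theorem loopA_eq_filter (threshold : Int) (L : List Int) (i : Nat) :
    removeValuesInPlaceLoopA threshold L i
      = L.take i ++ (L.drop i).filter (fun x => decide (x ≤ threshold)) := by
  fun_induction removeValuesInPlaceLoopA threshold L i with
  | case1 L i h hgt ih =>
      rw [ih, List.eraseIdx_eq_take_drop_succ]
      have h1 : List.take i (L.take i ++ L.drop (i + 1)) = L.take i := by
        simp [List.length_take, Nat.min_eq_left (le_of_lt h)]
      have h2 : List.drop i (L.take i ++ L.drop (i + 1)) = L.drop (i + 1) := by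
        simp [List.length_take, Nat.min_eq_left (le_of_lt h)]
      rw [h1, h2, List.drop_eq_getElem_cons h, List.filter_cons]
      have hnle : ¬ L[i] ≤ threshold := not_le.mpr hgt
      simp [hnle]
  | case2 L i h hngt ih =>
      have hle : L[i] ≤ threshold := le_of_not_gt hngt
      have htk : List.take (i + 1) L = List.take i L ++ [L[i]] := by
        rw [List.take_add_one, List.getElem?_eq_getElem h]; simp
      rw [ih, htk, List.drop_eq_getElem_cons h, List.filter_cons,
        if_pos (by simp [hle])]
      simp only [List.append_assoc, List.cons_append, List.nil_append]
  | case3 L i h =>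
      have hli : L.length ≤ i := le_of_not_gt h
      simp [List.take_of_length_le hli, List.drop_of_length_le hli]

-- B's comprehension is the filter.
theorem comp_eq_filter (threshold : Int) (L : List Int) :
    removeValuesInPlaceComp threshold L = L.filter (fun x => decide (x ≤ threshold)) := by
  induction L with
  | nil => rfl
  | cons x xs ih =>
      rw [removeValuesInPlaceComp, List.filter_cons, ih]
      by_cases h : x ≤ threshold <;> simp [h]

-- ===== VERDICT (by name: the statement is the Claim_ definition above) =====
theorem removeValuesInPlace_spec : Claim_equal_removeValuesInPlace := by
  intro L threshold _
  unfold Spec_removeValuesInPlace removeValuesInPlace removeValuesInPlace_alt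
  rw [loopA_eq_filter, comp_eq_filter]
  simp
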